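-- pv_equiv track=rewrite | github.com/sljm12/langchain_vttsplitter | langchain_vttsplitter/vttsplitter.py | extract_min_max_time
-- ===== SOURCE A (Python) =====
-- def get_time(text):
--     """
--     Gets the start time and end time from a time segment
--     """
--     segments = text.split(" --> ")
--     return (segments[0], segments[1].split(" align:")[0])
--
-- def extract_min_max_time(text):
--     """
--     Extract the min max time from a segment of VTT text
--     """
--     first = ""
--     last = ""
--     lines = text.split("\n")
--     for current_line in lines:
--         if len(first) == 0 and "->" in current_line:
--             first = current_line
--
--         if "->" in current_line:
--             last = current_line
--     return get_time(first)[0], get_time(last)[1]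
-- ===== SOURCE B (Python) =====
-- def get_time(text):
--     """
--     Gets the start time and end time from a time segment
--     """
--     segments = text.split(" --> ")
--     return (segments[0], segments[1].split(" align:")[0])
--
-- SEP = " --> "
--
-- def _line_at(text, pos):
--     """The full line of text surrounding index pos."""
--     start = text.rfind("\n", 0, pos) + 1
--     end = text.find("\n", pos)
--     return text[start:] if end == -1 else text[start:end]
--
-- def extract_min_max_time(text):
--     """
--     Extract the min max time from a segment of VTT text
--     """
--     first = _line_at(text, text.index(SEP))
--     last = _line_at(text, text.rfind(SEP))
--     return get_time(first)[0], get_time(last)[1]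
-- ===== Notes on version B (the rewrite author's own statement) =====
-- stated objective: alternative
-- what changed: A iterates over all split lines keeping two running markers (first/last '->' line); B never iterates lines at all: it locates the first and last ' --> ' separator with global substring search (index/rfind) and slices the enclosing line of each hit out of the text via newline rfind/find around that position.
import Mathlib
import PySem

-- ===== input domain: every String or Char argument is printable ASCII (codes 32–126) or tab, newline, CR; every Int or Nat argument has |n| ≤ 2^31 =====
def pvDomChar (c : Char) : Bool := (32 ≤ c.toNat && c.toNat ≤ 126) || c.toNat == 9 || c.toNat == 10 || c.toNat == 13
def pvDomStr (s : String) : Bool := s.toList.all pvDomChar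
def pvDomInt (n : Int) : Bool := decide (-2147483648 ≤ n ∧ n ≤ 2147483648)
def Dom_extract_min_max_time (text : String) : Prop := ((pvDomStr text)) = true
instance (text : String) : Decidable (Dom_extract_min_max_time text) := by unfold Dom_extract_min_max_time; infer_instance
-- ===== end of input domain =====

-- B abandons A's line-by-line loop entirely: it finds the first/last " --> " separator by global
-- index search (index/rfind) and slices the surrounding lines out of the text; objective: alternative.
-- Both Pythons raise (IndexError/ValueError) when no usable separator line exists; Pre_ excludes exactly
-- the inputs where A raises.

-- s.split(sep) for a NONEMPTY literal sep (split? is none only for sep = "", never here); exact.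
def pySplit (s sep : String) : List String := (PySem.Str.split? s sep).getD []

-- shared module helper get_time: returns none exactly where the Python raises IndexError
-- (no " --> " in its argument); segments[0] and [...][0] of a split always exist.
def get_time (text : String) : Option (String × String) :=
  let segments := pySplit text " --> "
  match PySem.List.pyGet? segments 0, PySem.List.pyGet? segments 1 with
  | some s0, some s1 => some (s0, (PySem.List.pyGet? (pySplit s1 " align:") 0).getD "")
  | _, _ => none

-- ===== PORT A =====
def extract_min_max_time (text : String) : String × String :=
  let lines := pySplit text "\n"
  let fl := lines.foldl
    (fun (st : String × String) current_line =>
      (if (PySem.Str.len st.1 == 0) && PySem.Str.isIn "->" current_line then current_line else st.1,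
       if PySem.Str.isIn "->" current_line then current_line else st.2)) ("", "")
  match get_time fl.1, get_time fl.2 with
  | some a, some b => (a.1, b.2)
  | _, _ => ("", "")  -- Python raises IndexError here; excluded by Pre_

-- ===== PORT B =====
-- helper _line_at: the full line of text surrounding index pos
def line_at (text : String) (pos : Int) : String :=
  let start := PySem.Str.rfindFrom text "\n" 0 (some pos) + 1
  let e := PySem.Str.findFrom text "\n" pos
  if e = -1 then PySem.Str.slice text (some start) none
  else PySem.Str.slice text (some start) (some e)

def extract_min_max_time_alt (text : String) : String × String :=
  let i := PySem.Str.find text " --> "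
  if i = -1 then ("", "")  -- text.index(SEP) raises ValueError here; excluded by Pre_
  else
    let first := line_at text i
    let last := line_at text (PySem.Str.rfind text " --> ")
    match get_time first, get_time last with
    | some a, some b => (a.1, b.2)
    | _, _ => ("", "")  -- Python raises IndexError here; excluded by Pre_

-- ===== PRECONDITION & SPEC =====
-- Pre_ = exactly the inputs on which the Python A returns: some line contains "->", and both the
-- first and the last such line are split by " --> " into at least two segments (else IndexError).
def Pre_extract_min_max_time (text : String) : Prop :=
  let ms := (pySplit text "\n").filter (fun line => PySem.Str.isIn "->" line)
  ms ≠ [] ∧ 2 ≤ (pySplit (ms.headD "") " --> ").length ∧ 2 ≤ (pySplit (ms.getLastD "") " --> ").length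
instance (text : String) : Decidable (Pre_extract_min_max_time text) := by unfold Pre_extract_min_max_time; infer_instance
def pvWitness_extract_min_max_time : String := "00:01 --> 00:02\nhello\n00:05 --> 00:09"

def Spec_extract_min_max_time (text : String) (out : String × String) : Prop := out = extract_min_max_time_alt text
instance (text : String) (out : String × String) : Decidable (Spec_extract_min_max_time text out) := by unfold Spec_extract_min_max_time; infer_instance

-- ===== CLAIM (what is proved, stated in full; the proofs are below) =====
def Claim_equal_extract_min_max_time : Prop := ∀ (text : String), Dom_extract_min_max_time text → Pre_extract_min_max_time text → Spec_extract_min_max_time text (extract_min_max_time text)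

-- ===== LEMMAS AND PROOFS =====

-- ---- A-side loop characterisation (first/last line containing "->") ----

theorem arrow_line_ne_empty (c : String) (hc : PySem.Str.isIn "->" c = true) : c ≠ "" := by
  intro h; subst h; exact absurd hc (by decide)

theorem foldA_ne (ls : List String) (f l : String) (hf : f ≠ "") :
    ls.foldl
      (fun (st : String × String) current_line =>
        (if (PySem.Str.len st.1 == 0) && PySem.Str.isIn "->" current_line then current_line else st.1,
         if PySem.Str.isIn "->" current_line then current_line else st.2)) (f, l)
    = (f, (ls.filter (fun line => PySem.Str.isIn "->" line)).getLastD l) := by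
  induction ls generalizing l with
  | nil => simp
  | cons c t ih =>
    have hlen : (PySem.Str.len f == 0) = false := by simp [PySem.Str.len_eq, hf]
    by_cases hc : PySem.Str.isIn "->" c = true
    · simp only [List.foldl_cons, List.filter_cons, hc, hlen, Bool.false_and,
        Bool.false_eq_true, if_false, if_true, List.getLastD_cons]
      exact ih c
    · simp only [Bool.not_eq_true] at hc
      simp only [List.foldl_cons, List.filter_cons, hc, hlen, Bool.false_and,
        Bool.false_eq_true, if_false]
      exact ih l

theorem foldA_empty (ls : List String) (l : String) :
    ls.foldl
      (fun (st : String × String) current_line =>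
        (if (PySem.Str.len st.1 == 0) && PySem.Str.isIn "->" current_line then current_line else st.1,
         if PySem.Str.isIn "->" current_line then current_line else st.2)) ("", l)
    = ((ls.filter (fun line => PySem.Str.isIn "->" line)).headD "",
       (ls.filter (fun line => PySem.Str.isIn "->" line)).getLastD l) := by
  induction ls generalizing l with
  | nil => simp
  | cons c t ih =>
    by_cases hc : PySem.Str.isIn "->" c = true
    · have hne := arrow_line_ne_empty c hc
      have hlen0 : (PySem.Str.len "" == 0) = true := by decide
      simp only [List.foldl_cons, List.filter_cons, hc, hlen0, Bool.true_and,
        if_true, List.headD_cons, List.getLastD_cons]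
      exact foldA_ne t c c hne
    · simp only [Bool.not_eq_true] at hc
      simp only [List.foldl_cons, List.filter_cons, hc, Bool.and_false,
        Bool.false_eq_true, if_false]
      exact ih l

-- ---- find: uniqueness from the library spec ----

theorem find_eq_of (s sub : List Char) (j : ℕ) (hj : sub <+: s.drop j)
    (hmin : ∀ i < j, ¬ sub <+: s.drop i) : PySem.Chars.find s sub = (j : Int) := by
  have hin : PySem.Chars.isIn sub s = true := (PySem.Chars.exists_prefix_drop_iff_isIn sub s).1 ⟨j, hj⟩
  have hne : PySem.Chars.find s sub ≠ -1 :=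
    (PySem.Chars.find_ne_neg_one_iff s sub).2 ((PySem.Chars.isIn_iff_infix sub s).1 hin)
  have h0 : 0 ≤ PySem.Chars.find s sub := by
    have := PySem.Chars.neg_one_le_find s sub; omega
  obtain ⟨hocc, hmn⟩ := PySem.Chars.find_spec h0
  have : (PySem.Chars.find s sub).toNat = j := by
    rcases Nat.lt_trichotomy (PySem.Chars.find s sub).toNat j with h | h | h
    · exact absurd hocc (hmin _ h)
    · exact h
    · exact absurd hj (hmn _ h)
  omega

theorem occ_lt_length (s sub : List Char) (hsub : sub ≠ []) (i : ℕ) (h : sub <+: s.drop i) :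
    i < s.length := by
  by_contra hle
  have : s.drop i = [] := List.drop_eq_nil_iff.2 (by omega)
  rw [this] at h
  exact hsub (List.prefix_nil.1 h)

-- ---- rfind: specification (PySem provides none) ----

theorem rfind_go_zero (s sub : List Char) :
    PySem.Chars.rfind.go s sub 0 = if sub.isPrefixOf s = true then 0 else -1 := by
  conv_lhs => rw [PySem.Chars.rfind.go]

theorem rfind_go_succ (s sub : List Char) (j : ℕ) :
    PySem.Chars.rfind.go s sub (j+1)
    = if sub.isPrefixOf (List.drop (j + 1) s) = true then ((j : Int) + 1)
      else PySem.Chars.rfind.go s sub j := by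
  conv_lhs => rw [PySem.Chars.rfind.go]
  norm_num

theorem rfind_go_spec (s sub : List Char) (m : ℕ) :
    (PySem.Chars.rfind.go s sub m = -1 ∧ ∀ i ≤ m, ¬ sub <+: s.drop i) ∨
    (∃ j ≤ m, PySem.Chars.rfind.go s sub m = (j : Int) ∧ sub <+: s.drop j ∧
       ∀ i, j < i → i ≤ m → ¬ sub <+: s.drop i) := by
  induction m with
  | zero =>
    rw [rfind_go_zero]
    by_cases h : sub.isPrefixOf s = true
    · right
      exact ⟨0, le_refl _, by simp [h], by simpa using List.isPrefixOf_iff_prefix.1 h,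
        fun i h1 h2 => by omega⟩
    · left
      refine ⟨by simp [h], fun i hi => ?_⟩
      interval_cases i
      simpa using fun hp => h (List.isPrefixOf_iff_prefix.2 hp)
  | succ m ih =>
    rw [rfind_go_succ]
    by_cases h : sub.isPrefixOf (List.drop (m+1) s) = true
    · right
      exact ⟨m+1, le_refl _, by simp [h], List.isPrefixOf_iff_prefix.1 h,
        fun i h1 h2 => by omega⟩
    · have hno : ¬ sub <+: s.drop (m+1) := fun hp => h (List.isPrefixOf_iff_prefix.2 hp)
      rcases ih with ⟨hv, hall⟩ | ⟨j, hjm, hv, hocc, hmax⟩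
      · left
        refine ⟨by simp [h, hv], fun i hi => ?_⟩
        rcases Nat.lt_or_ge i (m+1) with hlt | hge
        · exact hall i (by omega)
        · have : i = m + 1 := by omega
          subst this; exact hno
      · right
        refine ⟨j, by omega, by simp [h, hv], hocc, fun i h1 h2 => ?_⟩
        rcases Nat.lt_or_ge i (m+1) with hlt | hge
        · exact hmax i h1 (by omega)
        · have : i = m + 1 := by omega
          subst this; exact hno

theorem rfind_eq_of (s sub : List Char) (j : ℕ) (hj : sub <+: s.drop j)
    (hmax : ∀ i, j < i → ¬ sub <+: s.drop i) : PySem.Chars.rfind s sub = (j : Int) := by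
  have hjl : j ≤ s.length := by
    by_contra hgt
    have : s.drop j = [] := List.drop_eq_nil_iff.2 (by omega)
    rw [this] at hj
    have hsub : sub = [] := List.prefix_nil.1 hj
    exact hmax (j+1) (by omega) (by simp [hsub])
  show PySem.Chars.rfind.go s sub s.length = (j : Int)
  rcases rfind_go_spec s sub s.length with ⟨_, hall⟩ | ⟨j', hjm, hv, hocc, hmax'⟩
  · exact absurd hj (hall j hjl)
  · rcases Nat.lt_trichotomy j' j with h | h | h
    · exact absurd hj (hmax' j h hjl)
    · rw [hv, h]
    · exact absurd hocc (hmax j' h)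

theorem rfind_eq_neg_one_of (s sub : List Char) (h : ∀ i, ¬ sub <+: s.drop i) :
    PySem.Chars.rfind s sub = -1 := by
  show PySem.Chars.rfind.go s sub s.length = -1
  rcases rfind_go_spec s sub s.length with ⟨hv, _⟩ | ⟨j, _, _, hocc, _⟩
  · exact hv
  · exact absurd hocc (h j)

theorem rfind_spec_nonneg (s sub : List Char) (hsub : sub ≠ []) (h : 0 ≤ PySem.Chars.rfind s sub) :
    sub <+: s.drop (PySem.Chars.rfind s sub).toNat ∧
    ∀ i, (PySem.Chars.rfind s sub).toNat < i → ¬ sub <+: s.drop i := by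
  rcases rfind_go_spec s sub s.length with ⟨hv, _⟩ | ⟨j, hjm, hv, hocc, hmax⟩
  · exact absurd h (by show ¬ 0 ≤ PySem.Chars.rfind.go s sub s.length; omega)
  · have hrj : (PySem.Chars.rfind s sub).toNat = j := by
      show (PySem.Chars.rfind.go s sub s.length).toNat = j; omega
    rw [hrj]
    refine ⟨hocc, fun i hi hp => ?_⟩
    rcases Nat.lt_or_ge i (s.length + 1) with hlt | hge
    · exact hmax i hi (by omega) hp
    · exact absurd (occ_lt_length s sub hsub i hp) (by omega)

theorem rfind_nonneg_of_occ (s sub : List Char) (i : ℕ) (h : sub <+: s.drop i) :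
    0 ≤ PySem.Chars.rfind s sub := by
  have hocc0 : ∃ i ≤ s.length, sub <+: s.drop i := by
    rcases Nat.lt_or_ge i (s.length + 1) with hlt | hge
    · exact ⟨i, by omega, h⟩
    · have : s.drop i = [] := List.drop_eq_nil_iff.2 (by omega)
      rw [this] at h
      have hsub : sub = [] := List.prefix_nil.1 h
      exact ⟨0, by omega, by simp [hsub]⟩
  obtain ⟨i0, hi0, hocc⟩ := hocc0
  show 0 ≤ PySem.Chars.rfind.go s sub s.length
  rcases rfind_go_spec s sub s.length with ⟨_, hall⟩ | ⟨j, _, hv, _, _⟩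
  · exact absurd hocc (hall i0 hi0)
  · omega

-- ---- single-character occurrences ----

theorem singleton_prefix_drop (s : List Char) (c : Char) (p : ℕ) :
    [c] <+: s.drop p ↔ s[p]? = some c := by
  rw [← List.head?_drop]
  cases s.drop p with
  | nil => simp
  | cons h t =>
    simp only [List.head?_cons, Option.some.injEq, List.cons_prefix_cons, List.nil_prefix,
      and_true]
    exact ⟨fun h => h.symm, fun h => h.symm⟩

theorem not_occ_of_not_mem (s : List Char) (c : Char) (hc : c ∉ s) (p : ℕ) :
    ¬ [c] <+: s.drop p := by
  intro h
  rw [singleton_prefix_drop] at h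
  exact hc (List.mem_of_getElem? h)

theorem rfind_single_of_not_mem (s : List Char) (c : Char) (hc : c ∉ s) :
    PySem.Chars.rfind s [c] = -1 :=
  rfind_eq_neg_one_of s [c] (not_occ_of_not_mem s c hc)

theorem find_single_append (x t : List Char) (c : Char) (hx : c ∉ x) :
    PySem.Chars.find (x ++ c :: t) [c] = (x.length : Int) := by
  apply find_eq_of
  · rw [singleton_prefix_drop]
    simp
  · intro i hi hp
    rw [singleton_prefix_drop] at hp
    rw [List.getElem?_append_left hi] at hp
    exact hx (List.mem_of_getElem? hp)

theorem rfind_single_append (x t : List Char) (c : Char) :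
    PySem.Chars.rfind (x ++ c :: t) [c]
    = if PySem.Chars.rfind t [c] = -1 then (x.length : Int)
      else (x.length : Int) + 1 + PySem.Chars.rfind t [c] := by
  have hocc_iff : ∀ i : ℕ, x.length + 1 ≤ i →
      ([c] <+: (x ++ c :: t).drop i ↔ [c] <+: t.drop (i - (x.length + 1))) := by
    intro i hi
    rw [singleton_prefix_drop, singleton_prefix_drop]
    rw [List.getElem?_append_right (by omega)]
    have hix : i - x.length = (i - (x.length + 1)) + 1 := by omega
    rw [hix]
    simp
  by_cases ht : PySem.Chars.rfind t [c] = -1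
  · rw [if_pos ht]
    apply rfind_eq_of
    · rw [singleton_prefix_drop]; simp
    · intro i hi hp
      have hp' := (hocc_iff i (by omega)).1 hp
      have := rfind_nonneg_of_occ t [c] _ hp'
      omega
  · rw [if_neg ht]
    have h0 : 0 ≤ PySem.Chars.rfind t [c] := by
      have := PySem.Chars.neg_one_le_find t [c]
      -- rfind is bounded below by -1 via its spec
      rcases rfind_go_spec t [c] t.length with ⟨hv, _⟩ | ⟨j, _, hv, _, _⟩
      · exact absurd hv ht
      · show (0:Int) ≤ PySem.Chars.rfind.go t [c] t.length; omega
    obtain ⟨hocc, hmax⟩ := rfind_spec_nonneg t [c] (by simp) h0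
    have heq : PySem.Chars.rfind (x ++ c :: t) [c]
        = ((x.length + 1 + (PySem.Chars.rfind t [c]).toNat : ℕ) : Int) := by
      apply rfind_eq_of
      · rw [hocc_iff _ (by omega)]
        have : x.length + 1 + (PySem.Chars.rfind t [c]).toNat - (x.length + 1)
            = (PySem.Chars.rfind t [c]).toNat := by omega
        rw [this]; exact hocc
      · intro i hi hp
        have hp' := (hocc_iff i (by omega)).1 hp
        exact hmax _ (by omega) hp'
    rw [heq]
    push_cast
    omega

-- ---- occurrences of a c-free pattern split at a c ----

theorem occ_split (l t sep : List Char) (c : Char) (hcsep : c ∉ sep) (p : ℕ) :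
    sep <+: (l ++ c :: t).drop p ↔
      (p ≤ l.length ∧ sep <+: l.drop p) ∨
      (l.length + 1 ≤ p ∧ sep <+: t.drop (p - (l.length + 1))) := by
  have hdlo : p ≤ l.length → (l ++ c :: t).drop p = l.drop p ++ c :: t := by
    intro hp
    rw [List.drop_append]
    have : p - l.length = 0 := by omega
    rw [this, List.drop_zero]
  have hdhi : l.length + 1 ≤ p → (l ++ c :: t).drop p = t.drop (p - (l.length + 1)) := by
    intro hp
    rw [List.drop_append]
    have h1 : l.drop p = [] := List.drop_eq_nil_iff.2 (by omega)
    have h2 : p - l.length = (p - (l.length + 1)) + 1 := by omega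
    rw [h1, h2, List.drop_succ_cons, List.nil_append]
  constructor
  · intro h
    by_cases hp : p ≤ l.length
    · left
      refine ⟨hp, ?_⟩
      rw [hdlo hp] at h
      by_cases hle : sep.length ≤ l.length - p
      · rw [List.prefix_iff_eq_take] at h ⊢
        rw [List.take_append] at h
        have hz : sep.length - (l.drop p).length = 0 := by simp; omega
        rw [hz, List.take_zero, List.append_nil] at h
        exact h
      · exfalso
        rw [List.prefix_iff_eq_take, List.take_append] at h
        have hlen : (l.drop p).length = l.length - p := by simp
        apply hcsep
        rw [h]
        apply List.mem_append_right
        have hpos : 1 ≤ sep.length - (l.drop p).length := by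
          rw [hlen]; omega
        cases hn : sep.length - (l.drop p).length with
        | zero => omega
        | succ k => simp
    · right
      refine ⟨by omega, ?_⟩
      rwa [hdhi (by omega)] at h
  · rintro (⟨hp, h⟩ | ⟨hp, h⟩)
    · rw [hdlo hp]
      exact h.trans (List.prefix_append _ _)
    · rwa [hdhi hp]

theorem isIn_append_cons (l t sep : List Char) (c : Char) (hcsep : c ∉ sep) :
    PySem.Chars.isIn sep (l ++ c :: t) = (PySem.Chars.isIn sep l || PySem.Chars.isIn sep t) := by
  rw [Bool.eq_iff_iff, Bool.or_eq_true]
  rw [← PySem.Chars.exists_prefix_drop_iff_isIn, ← PySem.Chars.exists_prefix_drop_iff_isIn,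
    ← PySem.Chars.exists_prefix_drop_iff_isIn]
  constructor
  · rintro ⟨j, hj⟩
    rcases (occ_split l t sep c hcsep j).1 hj with ⟨_, h⟩ | ⟨_, h⟩
    · exact Or.inl ⟨_, h⟩
    · exact Or.inr ⟨_, h⟩
  · rintro (⟨j, hj⟩ | ⟨j, hj⟩)
    · by_cases hle : j ≤ l.length
      · exact ⟨j, (occ_split l t sep c hcsep j).2 (Or.inl ⟨hle, hj⟩)⟩
      · have : l.drop j = [] := List.drop_eq_nil_iff.2 (by omega)
        rw [this] at hj
        have hsep : sep = [] := List.prefix_nil.1 hj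
        exact ⟨0, (occ_split l t sep c hcsep 0).2 (Or.inl ⟨by omega, by simp [hsep]⟩)⟩
    · refine ⟨l.length + 1 + j, (occ_split l t sep c hcsep _).2 (Or.inr ⟨by omega, ?_⟩)⟩
      have : l.length + 1 + j - (l.length + 1) = j := by omega
      rw [this]
      exact hj

theorem find_append_cons_left (l t sep : List Char) (c : Char) (hcsep : c ∉ sep)
    (h : 0 ≤ PySem.Chars.find l sep) :
    PySem.Chars.find (l ++ c :: t) sep = PySem.Chars.find l sep := by
  obtain ⟨hocc, hmin⟩ := PySem.Chars.find_spec h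
  have hle : (PySem.Chars.find l sep).toNat ≤ l.length := by
    have := PySem.Chars.find_le_length l sep
    omega
  have heq : PySem.Chars.find (l ++ c :: t) sep = ((PySem.Chars.find l sep).toNat : Int) := by
    apply find_eq_of
    · exact (occ_split l t sep c hcsep _).2 (Or.inl ⟨hle, hocc⟩)
    · intro i hi hp
      rcases (occ_split l t sep c hcsep i).1 hp with ⟨_, h'⟩ | ⟨h', _⟩
      · exact hmin i hi h'
      · omega
  rw [heq]
  omega

theorem find_append_cons_right (l t sep : List Char) (c : Char) (hcsep : c ∉ sep)
    (hl : PySem.Chars.find l sep = -1) (h : 0 ≤ PySem.Chars.find t sep) :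
    PySem.Chars.find (l ++ c :: t) sep = (l.length : Int) + 1 + PySem.Chars.find t sep := by
  have hnol : ∀ j, ¬ sep <+: l.drop j := by
    intro j hj
    have : PySem.Chars.isIn sep l = true :=
      (PySem.Chars.exists_prefix_drop_iff_isIn sep l).1 ⟨j, hj⟩
    have := (PySem.Chars.find_ne_neg_one_iff l sep).2 ((PySem.Chars.isIn_iff_infix sep l).1 this)
    exact this hl
  obtain ⟨hocc, hmin⟩ := PySem.Chars.find_spec h
  have heq : PySem.Chars.find (l ++ c :: t) sep
      = ((l.length + 1 + (PySem.Chars.find t sep).toNat : ℕ) : Int) := by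
    apply find_eq_of
    · apply (occ_split l t sep c hcsep _).2
      refine Or.inr ⟨by omega, ?_⟩
      have : l.length + 1 + (PySem.Chars.find t sep).toNat - (l.length + 1)
          = (PySem.Chars.find t sep).toNat := by omega
      rw [this]
      exact hocc
    · intro i hi hp
      rcases (occ_split l t sep c hcsep i).1 hp with ⟨_, h'⟩ | ⟨hge, h'⟩
      · exact hnol i h'
      · exact hmin _ (by omega) h'
  rw [heq]
  push_cast
  omega

theorem rfind_append_cons_right (l t sep : List Char) (c : Char) (hcsep : c ∉ sep)
    (hsep : sep ≠ []) (h : 0 ≤ PySem.Chars.rfind t sep) :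
    PySem.Chars.rfind (l ++ c :: t) sep = (l.length : Int) + 1 + PySem.Chars.rfind t sep := by
  obtain ⟨hocc, hmax⟩ := rfind_spec_nonneg t sep hsep h
  have heq : PySem.Chars.rfind (l ++ c :: t) sep
      = ((l.length + 1 + (PySem.Chars.rfind t sep).toNat : ℕ) : Int) := by
    apply rfind_eq_of
    · apply (occ_split l t sep c hcsep _).2
      refine Or.inr ⟨by omega, ?_⟩
      have : l.length + 1 + (PySem.Chars.rfind t sep).toNat - (l.length + 1)
          = (PySem.Chars.rfind t sep).toNat := by omega
      rw [this]
      exact hocc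
    · intro i hi hp
      rcases (occ_split l t sep c hcsep i).1 hp with ⟨hle, h'⟩ | ⟨hge, h'⟩
      · omega
      · exact hmax _ (by omega) h'
  rw [heq]
  push_cast
  omega

theorem rfind_append_cons_left (l t sep : List Char) (c : Char) (hcsep : c ∉ sep)
    (hsep : sep ≠ []) (ht : PySem.Chars.rfind t sep = -1) (h : 0 ≤ PySem.Chars.rfind l sep) :
    PySem.Chars.rfind (l ++ c :: t) sep = PySem.Chars.rfind l sep := by
  obtain ⟨hocc, hmax⟩ := rfind_spec_nonneg l sep hsep h
  have hlt : (PySem.Chars.rfind l sep).toNat < l.length := occ_lt_length l sep hsep _ hocc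
  have heq : PySem.Chars.rfind (l ++ c :: t) sep = ((PySem.Chars.rfind l sep).toNat : Int) := by
    apply rfind_eq_of
    · exact (occ_split l t sep c hcsep _).2 (Or.inl ⟨by omega, hocc⟩)
    · intro i hi hp
      rcases (occ_split l t sep c hcsep i).1 hp with ⟨_, h'⟩ | ⟨hge, h'⟩
      · exact hmax i hi h'
      · have := rfind_nonneg_of_occ t sep _ h'
        omega
  rw [heq]
  omega

-- ---- line_at on the character level ----

def lineAtC (s : List Char) (pos : Int) : List Char :=
  let start := PySem.Chars.rfindFrom s ['\n'] 0 (some pos) + 1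
  let e := PySem.Chars.findFrom s ['\n'] pos
  if e = -1 then PySem.Chars.slice s (some start) none
  else PySem.Chars.slice s (some start) (some e)

theorem line_at_toList (text : String) (pos : Int) :
    (line_at text pos).toList = lineAtC text.toList pos := by
  unfold line_at lineAtC
  have hnl : ("\n" : String).toList = ['\n'] := by decide
  simp only [PySem.Str.rfindFrom_eq, PySem.Str.findFrom_eq, hnl]
  split <;> simp [PySem.Str.toList_slice]

theorem rfind_ge_neg_one (s sub : List Char) : -1 ≤ PySem.Chars.rfind s sub := by
  show -1 ≤ PySem.Chars.rfind.go s sub s.length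
  rcases rfind_go_spec s sub s.length with ⟨hv, _⟩ | ⟨j, _, hv, _, _⟩ <;> omega

theorem rfindFrom_zero_some (s sub : List Char) (i : Int) (h0 : 0 ≤ i) (hn : i ≤ s.length) :
    PySem.Chars.rfindFrom s sub 0 (some i) = PySem.Chars.rfind (s.take i.toNat) sub := by
  unfold PySem.Chars.rfindFrom
  have h1 : ¬ ((s.length : Int) < i) := by omega
  have h2 : ¬ (i < (0:Int)) := by omega
  simp only [h1, h2, if_false]
  have h3 := rfind_ge_neg_one (s.take i.toNat) sub
  by_cases hr : PySem.Chars.rfind (List.take i.toNat s) sub = -1 <;> simp [hr]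
  omega

theorem take_shift_append (l t : List Char) (c : Char) (m : ℕ) :
    (l ++ c :: t).take (l.length + 1 + m) = l ++ c :: t.take m := by
  rw [List.take_append]
  have h1 : l.length + 1 + m - l.length = m + 1 := by omega
  rw [h1, List.take_of_length_le (by omega), List.take_succ_cons]

theorem drop_shift_append (l t : List Char) (c : Char) (m : ℕ) :
    (l ++ c :: t).drop (l.length + 1 + m) = t.drop m := by
  rw [List.drop_append]
  have h1 : l.drop (l.length + 1 + m) = [] := List.drop_eq_nil_iff.2 (by omega)
  have h2 : l.length + 1 + m - l.length = m + 1 := by omega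
  rw [h1, h2, List.drop_succ_cons, List.nil_append]

theorem slice_zero_none (s : List Char) : PySem.Chars.slice s (some 0) none = s := by
  simp [PySem.Chars.slice_eq_listSlice, PySem.List.slice, PySem.List.clampIdx]

theorem slice_shift_none (l t : List Char) (c : Char) (a : Int) (ha : 0 ≤ a) :
    PySem.Chars.slice (l ++ c :: t) (some ((l.length : Int) + 1 + a)) none
    = PySem.Chars.slice t (some a) none := by
  simp only [PySem.Chars.slice_eq_listSlice, PySem.List.slice, PySem.List.clampIdx]
  have h1 : ¬ ((l.length : Int) + 1 + a < 0) := by omega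
  have h2 : ¬ (a < (0:Int)) := by omega
  simp only [h1, h2, if_false]
  have h3 : ((l.length : Int) + 1 + a).toNat = l.length + 1 + a.toNat := by omega
  have h4 : (l ++ c :: t).length = l.length + 1 + t.length := by
    rw [List.length_append, List.length_cons]; omega
  have h5 : min ((l.length : Int) + 1 + a).toNat (l ++ c :: t).length
      = l.length + 1 + min a.toNat t.length := by
    rw [h3, h4]; omega
  rw [h5, drop_shift_append, h4]
  congr 1
  omega

theorem slice_shift_some (l t : List Char) (c : Char) (a b : Int) (ha : 0 ≤ a) (hb : 0 ≤ b) :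
    PySem.Chars.slice (l ++ c :: t) (some ((l.length : Int) + 1 + a))
      (some ((l.length : Int) + 1 + b))
    = PySem.Chars.slice t (some a) (some b) := by
  simp only [PySem.Chars.slice_eq_listSlice, PySem.List.slice, PySem.List.clampIdx]
  have h1 : ¬ ((l.length : Int) + 1 + a < 0) := by omega
  have h1' : ¬ ((l.length : Int) + 1 + b < 0) := by omega
  have h2 : ¬ (a < (0:Int)) := by omega
  have h2' : ¬ (b < (0:Int)) := by omega
  simp only [h1, h1', h2, h2', if_false]
  have h4 : (l ++ c :: t).length = l.length + 1 + t.length := by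
    rw [List.length_append, List.length_cons]; omega
  have h5 : min ((l.length : Int) + 1 + a).toNat (l ++ c :: t).length
      = l.length + 1 + min a.toNat t.length := by rw [h4]; omega
  have h5' : min ((l.length : Int) + 1 + b).toNat (l ++ c :: t).length
      = l.length + 1 + min b.toNat t.length := by rw [h4]; omega
  rw [h5, h5', drop_shift_append]
  congr 1
  omega

theorem lineAtC_nl_free (s : List Char) (hc : '\n' ∉ s) (p : Int) (hp : 0 ≤ p)
    (hpl : p.toNat ≤ s.length) : lineAtC s p = s := by
  unfold lineAtC
  have hr : PySem.Chars.rfindFrom s ['\n'] 0 (some p) = -1 := by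
    rw [rfindFrom_zero_some s _ p hp (by omega)]
    exact rfind_single_of_not_mem _ _ (fun h => hc (List.mem_of_mem_take h))
  have hfnd : PySem.Chars.find (s.drop p.toNat) ['\n'] = -1 := by
    rw [PySem.Chars.find_eq_neg_one_iff]
    intro h
    exact hc (List.mem_of_mem_drop (h.subset (by simp)))
  have he : PySem.Chars.findFrom s ['\n'] p = -1 := by
    have hcast : p = ((p.toNat : ℕ) : Int) := by omega
    rw [hcast, PySem.Chars.findFrom_natCast s _ p.toNat hpl, hfnd]
    simp
  rw [hr, he]
  norm_num [slice_zero_none]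

theorem lineAtC_left (l t : List Char) (hcl : '\n' ∉ l) (p : Int) (hp : 0 ≤ p)
    (hpl : p.toNat ≤ l.length) : lineAtC (l ++ '\n' :: t) p = l := by
  unfold lineAtC
  have hr : PySem.Chars.rfindFrom (l ++ '\n' :: t) ['\n'] 0 (some p) = -1 := by
    rw [rfindFrom_zero_some _ _ p hp (by simp; omega)]
    have htake : (l ++ '\n' :: t).take p.toNat = l.take p.toNat := by
      rw [List.take_append]
      have : p.toNat - l.length = 0 := by omega
      rw [this, List.take_zero, List.append_nil]
    rw [htake]
    exact rfind_single_of_not_mem _ _ (fun h => hcl (List.mem_of_mem_take h))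
  have hdrop : (l ++ '\n' :: t).drop p.toNat = l.drop p.toNat ++ '\n' :: t := by
    rw [List.drop_append]
    have : p.toNat - l.length = 0 := by omega
    rw [this, List.drop_zero]
  have hfnd : PySem.Chars.find ((l ++ '\n' :: t).drop p.toNat) ['\n']
      = ((l.length - p.toNat : ℕ) : Int) := by
    rw [hdrop, find_single_append _ _ _ (fun h => hcl (List.mem_of_mem_drop h))]
    simp
  have he : PySem.Chars.findFrom (l ++ '\n' :: t) ['\n'] p = (l.length : Int) := by
    have hcast : p = ((p.toNat : ℕ) : Int) := by omega
    rw [hcast, PySem.Chars.findFrom_natCast _ _ p.toNat (by simp; omega), hfnd]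
    have hne : ¬ (((l.length - p.toNat : ℕ) : Int) = -1) := by omega
    rw [if_neg hne]
    omega
  rw [hr, he]
  have hne2 : ¬ ((l.length : Int) = -1) := by omega
  rw [if_neg hne2]
  norm_num

theorem lineAtC_shift (l t : List Char) (p : Int) (hp : 0 ≤ p) (hpl : p.toNat ≤ t.length) :
    lineAtC (l ++ '\n' :: t) ((l.length : Int) + 1 + p) = lineAtC t p := by
  unfold lineAtC
  have hlen : (l ++ '\n' :: t).length = l.length + 1 + t.length := by
    rw [List.length_append, List.length_cons]; omega
  -- start index
  have htake : (l ++ '\n' :: t).take ((l.length : Int) + 1 + p).toNat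
      = l ++ '\n' :: t.take p.toNat := by
    have : ((l.length : Int) + 1 + p).toNat = l.length + 1 + p.toNat := by omega
    rw [this, take_shift_append]
  have hrP := rfindFrom_zero_some (l ++ '\n' :: t) ['\n'] ((l.length : Int) + 1 + p)
    (by omega) (by rw [hlen]; omega)
  have hrp := rfindFrom_zero_some t ['\n'] p hp (by omega)
  rw [htake, rfind_single_append] at hrP
  -- end index
  have hdrop : (l ++ '\n' :: t).drop ((l.length : Int) + 1 + p).toNat = t.drop p.toNat := by
    have : ((l.length : Int) + 1 + p).toNat = l.length + 1 + p.toNat := by omega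
    rw [this, drop_shift_append]
  have heP : PySem.Chars.findFrom (l ++ '\n' :: t) ['\n'] ((l.length : Int) + 1 + p)
      = if PySem.Chars.find (t.drop p.toNat) ['\n'] = -1 then -1
        else (l.length : Int) + 1 + p + PySem.Chars.find (t.drop p.toNat) ['\n'] := by
    have hcast : (l.length : Int) + 1 + p = ((l.length + 1 + p.toNat : ℕ) : Int) := by omega
    rw [hcast, PySem.Chars.findFrom_natCast _ _ _ (by rw [hlen]; omega)]
    rw [← hcast, drop_shift_append]
  have hep : PySem.Chars.findFrom t ['\n'] p
      = if PySem.Chars.find (t.drop p.toNat) ['\n'] = -1 then -1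
        else p + PySem.Chars.find (t.drop p.toNat) ['\n'] := by
    have hcast : p = ((p.toNat : ℕ) : Int) := by omega
    rw [hcast, PySem.Chars.findFrom_natCast _ _ _ (by omega), ← hcast]
  rw [hrP, heP, hrp, hep]
  have hg := PySem.Chars.neg_one_le_find (t.drop p.toNat) ['\n']
  have hr' := rfind_ge_neg_one (t.take p.toNat) ['\n']
  by_cases hgz : PySem.Chars.find (t.drop p.toNat) ['\n'] = -1
  · rw [if_pos hgz, if_pos hgz, if_pos rfl, if_pos rfl]
    by_cases hrz : PySem.Chars.rfind (t.take p.toNat) ['\n'] = -1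
    · rw [if_pos hrz, hrz]
      have : (l.length : Int) + 1 = (l.length : Int) + 1 + (-1 + 1) := by ring
      rw [this]
      exact slice_shift_none l t '\n' _ (by omega)
    · rw [if_neg hrz]
      have : (l.length : Int) + 1 + PySem.Chars.rfind (t.take p.toNat) ['\n'] + 1
          = (l.length : Int) + 1 + (PySem.Chars.rfind (t.take p.toNat) ['\n'] + 1) := by ring
      rw [this]
      exact slice_shift_none l t '\n' _ (by omega)
  · rw [if_neg hgz, if_neg hgz]
    have hgz' : ¬ ((l.length : Int) + 1 + p + PySem.Chars.find (t.drop p.toNat) ['\n'] = -1) := by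
      omega
    have hpz' : ¬ (p + PySem.Chars.find (t.drop p.toNat) ['\n'] = -1) := by omega
    rw [if_neg hgz', if_neg hpz']
    have hb : (l.length : Int) + 1 + p + PySem.Chars.find (t.drop p.toNat) ['\n']
        = (l.length : Int) + 1 + (p + PySem.Chars.find (t.drop p.toNat) ['\n']) := by ring
    by_cases hrz : PySem.Chars.rfind (t.take p.toNat) ['\n'] = -1
    · rw [if_pos hrz, hrz, hb]
      have : (l.length : Int) + 1 = (l.length : Int) + 1 + (-1 + 1) := by ring
      rw [this]
      exact slice_shift_some l t '\n' _ _ (by omega) (by omega)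
    · rw [if_neg hrz, hb]
      have : (l.length : Int) + 1 + PySem.Chars.rfind (t.take p.toNat) ['\n'] + 1
          = (l.length : Int) + 1 + (PySem.Chars.rfind (t.take p.toNat) ['\n'] + 1) := by ring
      rw [this]
      exact slice_shift_some l t '\n' _ _ (by omega) (by omega)

-- ---- splitOn: structure lemmas (PySem provides none) ----

theorem splitOn_go_zero (sep l cur : List Char) (acc : List (List Char)) :
    PySem.Chars.splitOn.go sep 0 l cur acc = ((cur.reverse ++ l) :: acc).reverse := by
  conv_lhs => rw [PySem.Chars.splitOn.go]

theorem splitOn_go_nil (sep cur : List Char) (fuel : ℕ) (acc : List (List Char)) :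
    PySem.Chars.splitOn.go sep fuel [] cur acc = (cur.reverse :: acc).reverse := by
  cases fuel with
  | zero => rw [splitOn_go_zero]; simp
  | succ n => rfl

theorem splitOn_go_cons (sep cur l : List Char) (ch : Char) (fuel : ℕ) (acc : List (List Char)) :
    PySem.Chars.splitOn.go sep (fuel+1) (ch :: l) cur acc
    = if sep.isPrefixOf (ch :: l) = true then
        PySem.Chars.splitOn.go sep fuel (List.drop sep.length (ch :: l)) [] (cur.reverse :: acc)
      else PySem.Chars.splitOn.go sep fuel l (ch :: cur) acc := by
  conv_lhs => rw [PySem.Chars.splitOn.go]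

theorem splitOn_go_acc (sep : List Char) (fuel : ℕ) (l cur : List Char) (acc : List (List Char)) :
    PySem.Chars.splitOn.go sep fuel l cur acc
    = acc.reverse ++ PySem.Chars.splitOn.go sep fuel l cur [] := by
  induction fuel generalizing l cur acc with
  | zero => rw [splitOn_go_zero, splitOn_go_zero]; simp
  | succ n ih =>
    cases l with
    | nil => rw [splitOn_go_nil, splitOn_go_nil]; simp
    | cons ch rest =>
      rw [splitOn_go_cons, splitOn_go_cons]
      by_cases h : sep.isPrefixOf (ch :: rest) = true
      · rw [if_pos h, if_pos h, ih _ _ (cur.reverse :: acc), ih _ _ [cur.reverse]]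
        simp
      · rw [if_neg h, if_neg h, ih _ _ acc]

theorem splitOn_go_no_occ (sep : List Char) (l cur : List Char) (acc : List (List Char))
    (fuel : ℕ) (h : ∀ j, ¬ sep <+: l.drop j) :
    PySem.Chars.splitOn.go sep fuel l cur acc = ((cur.reverse ++ l) :: acc).reverse := by
  induction fuel generalizing l cur acc with
  | zero => rw [splitOn_go_zero]
  | succ n ih =>
    cases l with
    | nil => rw [splitOn_go_nil]; simp
    | cons ch rest =>
      rw [splitOn_go_cons]
      have hmiss : ¬ sep.isPrefixOf (ch :: rest) = true := by
        intro hp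
        exact h 0 (by simpa using List.isPrefixOf_iff_prefix.1 hp)
      rw [if_neg hmiss, ih rest (ch :: cur) acc (fun j => by simpa using h (j+1))]
      simp

theorem splitOn_no_occ (l sep : List Char) (h : ∀ j, ¬ sep <+: l.drop j) :
    PySem.Chars.splitOn l sep = [l] := by
  show PySem.Chars.splitOn.go sep (l.length + 1) l [] [] = [l]
  rw [splitOn_go_no_occ sep l [] [] (l.length + 1) h]
  simp

theorem splitOn_go_single_hit (c : Char) (y : List Char) :
    ∀ (x : List Char), c ∉ x → ∀ (fuel : ℕ), x.length + 1 ≤ fuel →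
    ∀ (cur : List Char) (acc : List (List Char)),
    PySem.Chars.splitOn.go [c] fuel (x ++ c :: y) cur acc
    = PySem.Chars.splitOn.go [c] (fuel - (x.length + 1)) y [] ((cur.reverse ++ x) :: acc) := by
  intro x
  induction x with
  | nil =>
    intro _ fuel hf cur acc
    obtain ⟨f, rfl⟩ : ∃ f, fuel = f + 1 := ⟨fuel - 1, by omega⟩
    rw [List.nil_append, splitOn_go_cons]
    have hhit : [c].isPrefixOf (c :: y) = true := by simp [List.isPrefixOf]
    rw [if_pos hhit]
    simp
  | cons a x' ihx =>
    intro hx fuel hf cur acc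
    obtain ⟨f, rfl⟩ : ∃ f, fuel = f + 1 := ⟨fuel - 1, by omega⟩
    rw [List.cons_append, splitOn_go_cons]
    have hne : ¬ c = a := fun h => hx (by rw [h]; exact List.mem_cons_self)
    have hmiss : ¬ [c].isPrefixOf (a :: (x' ++ c :: y)) = true := by
      simp [List.isPrefixOf, hne]
    rw [if_neg hmiss]
    have hx' : c ∉ x' := fun h => hx (List.mem_cons_of_mem a h)
    rw [ihx hx' f (by simp at hf; try omega) (a :: cur) acc]
    have h1 : f - (x'.length + 1) = f + 1 - ((a :: x').length + 1) := by simp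
    have h2 : (a :: cur).reverse ++ x' = cur.reverse ++ a :: x' := by simp
    rw [h1, h2]

theorem splitOn_cons_of (x y : List Char) (c : Char) (hx : c ∉ x) :
    PySem.Chars.splitOn (x ++ c :: y) [c] = x :: PySem.Chars.splitOn y [c] := by
  show PySem.Chars.splitOn.go [c] ((x ++ c :: y).length + 1) (x ++ c :: y) [] []
      = x :: PySem.Chars.splitOn.go [c] (y.length + 1) y [] []
  rw [splitOn_go_single_hit c y x hx _ (by simp; try omega) [] []]
  rw [splitOn_go_acc]
  have hfuel : (x ++ c :: y).length + 1 - (x.length + 1) = y.length + 1 := by simp; try omega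
  rw [hfuel]
  simp

-- every string decomposes into its newline-free lines, and splitOn returns exactly them
theorem split_structure (c : Char) (y : List Char) :
    ∃ lines : List (List Char), lines ≠ [] ∧ (∀ p ∈ lines, c ∉ p) ∧
      PySem.Chars.join [c] lines = y ∧ PySem.Chars.splitOn y [c] = lines := by
  induction hn : y.length using Nat.strong_induction_on generalizing y with
  | _ n ih =>
  by_cases hc : c ∈ y
  · have hdw : y.dropWhile (· ≠ c) ≠ [] := by
      intro h
      have : y.takeWhile (· ≠ c) = y := by
        have := List.takeWhile_append_dropWhile (p := fun a => decide (a ≠ c)) (l := y)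
        rwa [h, List.append_nil] at this
      have hcy := hc
      rw [← this] at hcy
      have := List.mem_takeWhile_imp hcy
      simp at this
    obtain ⟨y', hy'⟩ : ∃ y', y.dropWhile (· ≠ c) = c :: y' := by
      cases hdd : y.dropWhile (· ≠ c) with
      | nil => exact absurd hdd hdw
      | cons h t =>
        have hnp := List.head_dropWhile_not (p := fun a => decide (a ≠ c)) (l := y) hdw
        simp only [hdd, List.head_cons] at hnp
        refine ⟨t, ?_⟩
        have : h = c := by simpa using hnp
        rw [this]
    set x := y.takeWhile (· ≠ c) with hxdef
    have hxc : c ∉ x := by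
      intro h
      have := List.mem_takeWhile_imp h
      simp at this
    have hyx : y = x ++ c :: y' := by
      rw [← hy', hxdef, List.takeWhile_append_dropWhile]
    have hlen : y'.length < n := by
      rw [← hn, hyx]; simp; omega
    obtain ⟨lines', hne', hfree', hjoin', hsplit'⟩ := ih y'.length hlen y' rfl
    refine ⟨x :: lines', by simp, ?_, ?_, ?_⟩
    · intro p hp
      rcases List.mem_cons.1 hp with h | h
      · rw [h]; exact hxc
      · exact hfree' p h
    · cases lines' with
      | nil => exact absurd rfl hne'
      | cons q r =>
        rw [PySem.Chars.join_cons_cons, hjoin', hyx]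
        simp
    · rw [hyx, splitOn_cons_of x y' c hxc, hsplit']
  · refine ⟨[y], by simp, by simpa using hc, by simp [PySem.Chars.join_singleton], ?_⟩
    exact splitOn_no_occ y [c] (not_occ_of_not_mem y c hc)

-- ---- membership of a pattern in a joined line list ----

theorem isIn_join_iff (sep : List Char) (c : Char) (hcsep : c ∉ sep)
    (lines : List (List Char)) (hne : lines ≠ []) :
    PySem.Chars.isIn sep (PySem.Chars.join [c] lines) = true ↔
      ∃ L ∈ lines, PySem.Chars.isIn sep L = true := by
  induction lines with
  | nil => exact absurd rfl hne
  | cons l rest ih =>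
    cases rest with
    | nil => simp [PySem.Chars.join_singleton]
    | cons q r =>
      rw [PySem.Chars.join_cons_cons]
      have : l ++ [c] ++ PySem.Chars.join [c] (q :: r)
          = l ++ c :: PySem.Chars.join [c] (q :: r) := by simp
      rw [this, isIn_append_cons _ _ _ _ hcsep]
      rw [Bool.or_eq_true, ih (by simp)]
      constructor
      · rintro (h | ⟨L, hL, h⟩)
        · exact ⟨l, by simp, h⟩
        · exact ⟨L, by simp [hL], h⟩
      · rintro ⟨L, hL, h⟩
        rcases List.mem_cons.1 hL with rfl | hL'
        · exact Or.inl h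
        · exact Or.inr ⟨L, hL', h⟩

-- ---- the two main characterisations ----

theorem lineAt_first (sep : List Char) (hcsep : '\n' ∉ sep) (hsep : sep ≠ [])
    (lines : List (List Char)) (hne : lines ≠ []) (hfree : ∀ p ∈ lines, '\n' ∉ p)
    (hM : lines.filter (fun p => PySem.Chars.isIn sep p) ≠ []) :
    0 ≤ PySem.Chars.find (PySem.Chars.join ['\n'] lines) sep ∧
    lineAtC (PySem.Chars.join ['\n'] lines) (PySem.Chars.find (PySem.Chars.join ['\n'] lines) sep)
      = (lines.filter (fun p => PySem.Chars.isIn sep p)).headD [] := by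
  induction lines with
  | nil => exact absurd rfl hne
  | cons l rest ih =>
    cases rest with
    | nil =>
      rw [PySem.Chars.join_singleton]
      have hl : PySem.Chars.isIn sep l = true := by
        by_contra h
        simp only [Bool.not_eq_true] at h
        simp [h] at hM
      have h0 : 0 ≤ PySem.Chars.find l sep :=
        (PySem.Chars.find_nonneg_iff l sep).2 ((PySem.Chars.isIn_iff_infix sep l).1 hl)
      refine ⟨h0, ?_⟩
      obtain ⟨hocc, _⟩ := PySem.Chars.find_spec h0
      have hlt : (PySem.Chars.find l sep).toNat < l.length := occ_lt_length l sep hsep _ hocc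
      rw [lineAtC_nl_free l (hfree l (by simp)) _ h0 (by omega)]
      simp [hl]
    | cons q r =>
      have hjoin : PySem.Chars.join ['\n'] (l :: q :: r)
          = l ++ '\n' :: PySem.Chars.join ['\n'] (q :: r) := by
        rw [PySem.Chars.join_cons_cons]; simp
      rw [hjoin]
      by_cases hl : PySem.Chars.isIn sep l = true
      · have h0l : 0 ≤ PySem.Chars.find l sep :=
          (PySem.Chars.find_nonneg_iff l sep).2 ((PySem.Chars.isIn_iff_infix sep l).1 hl)
        rw [find_append_cons_left _ _ _ _ hcsep h0l]
        refine ⟨h0l, ?_⟩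
        obtain ⟨hocc, _⟩ := PySem.Chars.find_spec h0l
        have hlt : (PySem.Chars.find l sep).toNat < l.length := occ_lt_length l sep hsep _ hocc
        rw [lineAtC_left _ _ (hfree l (by simp)) _ h0l (by omega)]
        simp [hl]
      · simp only [Bool.not_eq_true] at hl
        have hMrest : (q :: r).filter (fun p => PySem.Chars.isIn sep p) ≠ [] := by
          simpa [List.filter_cons, hl] using hM
        have hInJ : PySem.Chars.isIn sep (PySem.Chars.join ['\n'] (q :: r)) = true := by
          rw [isIn_join_iff sep '\n' hcsep _ (by simp)]
          obtain ⟨L, hLmem⟩ := List.exists_mem_of_ne_nil _ hMrest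
          obtain ⟨hLm, hLin⟩ := List.mem_filter.1 hLmem
          exact ⟨L, hLm, hLin⟩
        have h0J : 0 ≤ PySem.Chars.find (PySem.Chars.join ['\n'] (q :: r)) sep :=
          (PySem.Chars.find_nonneg_iff _ sep).2 ((PySem.Chars.isIn_iff_infix sep _).1 hInJ)
        have hfl : PySem.Chars.find l sep = -1 :=
          (PySem.Chars.find_eq_neg_one_iff l sep).2
            (fun h => by rw [(PySem.Chars.isIn_iff_infix sep l).2 h] at hl; exact absurd hl (by simp))
        rw [find_append_cons_right _ _ _ _ hcsep hfl h0J]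
        refine ⟨by omega, ?_⟩
        obtain ⟨hIH0, hIH⟩ := ih (by simp) (fun p hp => hfree p (List.mem_cons_of_mem _ hp)) hMrest
        obtain ⟨hoccJ, _⟩ := PySem.Chars.find_spec h0J
        have hltJ : (PySem.Chars.find (PySem.Chars.join ['\n'] (q :: r)) sep).toNat
            < (PySem.Chars.join ['\n'] (q :: r)).length := occ_lt_length _ sep hsep _ hoccJ
        rw [lineAtC_shift l _ _ h0J (by omega), hIH]
        simp [hl]

theorem lineAt_last (sep : List Char) (hcsep : '\n' ∉ sep) (hsep : sep ≠ [])
    (lines : List (List Char)) (hne : lines ≠ []) (hfree : ∀ p ∈ lines, '\n' ∉ p)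
    (hM : lines.filter (fun p => PySem.Chars.isIn sep p) ≠ []) :
    0 ≤ PySem.Chars.rfind (PySem.Chars.join ['\n'] lines) sep ∧
    lineAtC (PySem.Chars.join ['\n'] lines) (PySem.Chars.rfind (PySem.Chars.join ['\n'] lines) sep)
      = (lines.filter (fun p => PySem.Chars.isIn sep p)).getLastD [] := by
  induction lines with
  | nil => exact absurd rfl hne
  | cons l rest ih =>
    cases rest with
    | nil =>
      rw [PySem.Chars.join_singleton]
      have hl : PySem.Chars.isIn sep l = true := by
        by_contra h
        simp only [Bool.not_eq_true] at h
        simp [h] at hM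
      obtain ⟨j, hj⟩ := (PySem.Chars.exists_prefix_drop_iff_isIn sep l).2 hl
      have h0 : 0 ≤ PySem.Chars.rfind l sep := rfind_nonneg_of_occ l sep j hj
      refine ⟨h0, ?_⟩
      obtain ⟨hocc, _⟩ := rfind_spec_nonneg l sep hsep h0
      have hlt : (PySem.Chars.rfind l sep).toNat < l.length := occ_lt_length l sep hsep _ hocc
      rw [lineAtC_nl_free l (hfree l (by simp)) _ h0 (by omega)]
      simp [hl]
    | cons q r =>
      have hjoin : PySem.Chars.join ['\n'] (l :: q :: r)
          = l ++ '\n' :: PySem.Chars.join ['\n'] (q :: r) := by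
        rw [PySem.Chars.join_cons_cons]; simp
      rw [hjoin]
      by_cases hrest : (q :: r).filter (fun p => PySem.Chars.isIn sep p) ≠ []
      · have hInJ : PySem.Chars.isIn sep (PySem.Chars.join ['\n'] (q :: r)) = true := by
          rw [isIn_join_iff sep '\n' hcsep _ (by simp)]
          obtain ⟨L, hLmem⟩ := List.exists_mem_of_ne_nil _ hrest
          obtain ⟨hLm, hLin⟩ := List.mem_filter.1 hLmem
          exact ⟨L, hLm, hLin⟩
        obtain ⟨j, hj⟩ := (PySem.Chars.exists_prefix_drop_iff_isIn sep _).2 hInJ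
        have h0J : 0 ≤ PySem.Chars.rfind (PySem.Chars.join ['\n'] (q :: r)) sep :=
          rfind_nonneg_of_occ _ sep j hj
        rw [rfind_append_cons_right _ _ _ _ hcsep hsep h0J]
        refine ⟨by omega, ?_⟩
        obtain ⟨hIH0, hIH⟩ := ih (by simp) (fun p hp => hfree p (List.mem_cons_of_mem _ hp)) hrest
        obtain ⟨hoccJ, _⟩ := rfind_spec_nonneg _ sep hsep h0J
        have hltJ : (PySem.Chars.rfind (PySem.Chars.join ['\n'] (q :: r)) sep).toNat
            < (PySem.Chars.join ['\n'] (q :: r)).length := occ_lt_length _ sep hsep _ hoccJ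
        rw [lineAtC_shift l _ _ h0J (by omega), hIH]
        obtain ⟨f, F, hF⟩ : ∃ f F, (q :: r).filter (fun p => PySem.Chars.isIn sep p) = f :: F := by
          cases hq : (q :: r).filter (fun p => PySem.Chars.isIn sep p) with
          | nil => exact absurd hq hrest
          | cons f F => exact ⟨f, F, rfl⟩
        by_cases hl : PySem.Chars.isIn sep l = true
        · simp [hl, hF]
        · simp only [Bool.not_eq_true] at hl
          simp [hl, hF]
      · simp only [not_not] at hrest
        have hl : PySem.Chars.isIn sep l = true := by
          by_contra h
          simp only [Bool.not_eq_true] at h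
          simp [h, hrest] at hM
        have hrfJ : PySem.Chars.rfind (PySem.Chars.join ['\n'] (q :: r)) sep = -1 := by
          apply rfind_eq_neg_one_of
          intro i hi
          have : PySem.Chars.isIn sep (PySem.Chars.join ['\n'] (q :: r)) = true :=
            (PySem.Chars.exists_prefix_drop_iff_isIn sep _).1 ⟨i, hi⟩
          rw [isIn_join_iff sep '\n' hcsep _ (by simp)] at this
          obtain ⟨L, hLm, hLin⟩ := this
          have : L ∈ (q :: r).filter (fun p => PySem.Chars.isIn sep p) :=
            List.mem_filter.2 ⟨hLm, hLin⟩
          rw [hrest] at this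
          simp at this
        obtain ⟨j, hj⟩ := (PySem.Chars.exists_prefix_drop_iff_isIn sep l).2 hl
        have h0l : 0 ≤ PySem.Chars.rfind l sep := rfind_nonneg_of_occ l sep j hj
        rw [rfind_append_cons_left _ _ _ _ hcsep hsep hrfJ h0l]
        refine ⟨h0l, ?_⟩
        obtain ⟨hocc, _⟩ := rfind_spec_nonneg l sep hsep h0l
        have hlt : (PySem.Chars.rfind l sep).toNat < l.length := occ_lt_length l sep hsep _ hocc
        rw [lineAtC_left _ _ (hfree l (by simp)) _ h0l (by omega)]
        simp [hl, hrest]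

-- ---- bridging String-level values to the character level ----

theorem pySplit_eq (s sep : String) (h : sep.toList ≠ []) :
    pySplit s sep = (PySem.Chars.splitOn s.toList sep.toList).map String.ofList := by
  have hbridge := PySem.Str.split?_map s sep
  have hsep : sep.toList.isEmpty = false := by
    cases hl : sep.toList with
    | nil => exact absurd hl h
    | cons a b => simp
  rw [PySem.Chars.split?] at hbridge
  rw [if_neg (by simp [hsep])] at hbridge
  cases ho : PySem.Str.split? s sep with
  | none => rw [ho] at hbridge; simp at hbridge
  | some L =>
    rw [ho] at hbridge
    simp only [Option.map_some, Option.some.injEq] at hbridge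
    unfold pySplit
    rw [ho]
    show L = _
    rw [← hbridge, List.map_map]
    have : (String.ofList ∘ String.toList) = id := by
      funext x
      simp
    rw [this, List.map_id]

theorem headD_map_ofList (l : List (List Char)) (hl : l ≠ []) :
    (l.map String.ofList).headD "" = String.ofList (l.headD []) := by
  cases l with
  | nil => exact absurd rfl hl
  | cons a t => simp

theorem getLastD_map_ofList (l : List (List Char)) (hl : l ≠ []) :
    (l.map String.ofList).getLastD "" = String.ofList (l.getLastD []) := by
  rw [List.getLastD_eq_getLast?, List.getLastD_eq_getLast?, List.getLast?_map]
  cases hg : l.getLast? with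
  | none => exact absurd (List.getLast?_eq_none_iff.1 hg) hl
  | some a => simp

theorem getLast?_cons_ne {α : Type} (x : α) (t : List α) (h : t ≠ []) :
    (x :: t).getLast? = t.getLast? := by
  cases hg : t.getLast? with
  | none => exact absurd (List.getLast?_eq_none_iff.1 hg) h
  | some a => simp [List.getLast?_cons, hg]

theorem filter_getLast?_of {α : Type} (l : List α) (p : α → Bool) (a : α)
    (ha : l.getLast? = some a) (hp : p a = true) : (l.filter p).getLast? = some a := by
  induction l with
  | nil => simp at ha
  | cons x t ih =>
    by_cases htne : t = []
    · subst htne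
      simp only [List.getLast?_cons, List.getLast?_nil, Option.getD_none,
        Option.some.injEq] at ha
      subst ha
      simp [hp]
    · rw [getLast?_cons_ne x t htne] at ha
      have hft := ih ha
      have hfne : t.filter p ≠ [] := by
        intro hnil
        rw [hnil] at hft
        simp at hft
      rw [List.filter_cons]
      by_cases hx : p x = true
      · rw [if_pos hx, getLast?_cons_ne x _ hfne]
        exact hft
      · rw [if_neg hx]
        exact hft

theorem isIn_sep_imp_arrow (x : List Char) (h : PySem.Chars.isIn " --> ".toList x = true) :
    PySem.Chars.isIn "->".toList x = true := by
  rw [PySem.Chars.isIn_iff_infix] at h ⊢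
  exact List.IsInfix.trans (by decide) h

theorem isIn_of_two_le_split (F : String)
    (h : 2 ≤ (pySplit F " --> ").length) : PySem.Chars.isIn " --> ".toList F.toList = true := by
  by_contra hno
  simp only [Bool.not_eq_true] at hno
  have hocc : ∀ j, ¬ " --> ".toList <+: F.toList.drop j := by
    intro j hj
    have : PySem.Chars.isIn " --> ".toList F.toList = true :=
      (PySem.Chars.exists_prefix_drop_iff_isIn _ _).1 ⟨j, hj⟩
    rw [this] at hno
    exact absurd hno (by simp)
  have hsplit : PySem.Chars.splitOn F.toList " --> ".toList = [F.toList] :=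
    splitOn_no_occ _ _ hocc
  rw [pySplit_eq F " --> " (by decide), hsplit] at h
  simp at h

-- ===== VERDICT (by name: the statement is the Claim_ definition above) =====
theorem extract_min_max_time_spec : Claim_equal_extract_min_max_time := by
  intro text _ hpre
  unfold Spec_extract_min_max_time
  obtain ⟨hms, hlen1, hlen2⟩ := hpre
  -- character-level line decomposition of the text
  obtain ⟨linesC, hneC, hfreeC, hjoinC, hsplitC⟩ := split_structure '\n' text.toList
  have hlines : pySplit text "\n" = linesC.map String.ofList := by
    rw [pySplit_eq text "\n" (by decide)]
    have : ("\n" : String).toList = ['\n'] := by decide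
    rw [this, hsplitC]
  -- the String-level and character-level "->"-filtered line lists
  have harrow : ∀ p : List Char,
      PySem.Str.isIn "->" (String.ofList p) = PySem.Chars.isIn "->".toList p := by
    intro p
    rw [PySem.Str.isIn_eq]
    simp
  have hfiltmap : (pySplit text "\n").filter (fun line => PySem.Str.isIn "->" line)
      = (linesC.filter (fun p => PySem.Chars.isIn "->".toList p)).map String.ofList := by
    rw [hlines, List.filter_map]
    congr 1
    apply List.filter_congr
    intro p _
    exact harrow p
  set MA := linesC.filter (fun p => PySem.Chars.isIn "->".toList p) with hMAdef
  have hMAne : MA ≠ [] := by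
    intro h
    rw [hfiltmap, h] at hms
    simp at hms
  -- head and last of the String-level filter, as characters
  have hheadA : ((pySplit text "\n").filter (fun line => PySem.Str.isIn "->" line)).headD ""
      = String.ofList (MA.headD []) := by
    rw [hfiltmap]
    exact headD_map_ofList _ hMAne
  have hlastA : ((pySplit text "\n").filter (fun line => PySem.Str.isIn "->" line)).getLastD ""
      = String.ofList (MA.getLastD []) := by
    rw [hfiltmap]
    exact getLastD_map_ofList _ hMAne
  -- Pre_ gives: head and last "->" lines contain the full separator
  have hheadIn : PySem.Chars.isIn " --> ".toList (MA.headD []) = true := by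
    have := isIn_of_two_le_split _ hlen1
    rw [hheadA] at this
    simpa [String.ofList_toList] using this
  have hlastIn : PySem.Chars.isIn " --> ".toList (MA.getLastD []) = true := by
    have := isIn_of_two_le_split _ hlen2
    rw [hlastA] at this
    simpa [String.ofList_toList] using this
  -- the " --> "-filtered list agrees with the "->"-filtered one at head and last
  set M := linesC.filter (fun p => PySem.Chars.isIn " --> ".toList p) with hMdef
  have hMfilt : M = MA.filter (fun p => PySem.Chars.isIn " --> ".toList p) := by
    rw [hMdef, hMAdef, List.filter_filter]
    apply List.filter_congr
    intro p _
    by_cases h : PySem.Chars.isIn " --> ".toList p = true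
    · rw [h, isIn_sep_imp_arrow p h]; rfl
    · simp only [Bool.not_eq_true] at h
      rw [h]; simp
  obtain ⟨fA, FA, hFA⟩ : ∃ f F, MA = f :: F := by
    cases h : MA with
    | nil => exact absurd h hMAne
    | cons f F => exact ⟨f, F, rfl⟩
  have hheadM : M.headD [] = MA.headD [] := by
    rw [hMfilt, hFA]
    have hf : PySem.Chars.isIn " --> ".toList fA = true := by
      rw [hFA] at hheadIn; simpa using hheadIn
    have hf' : PySem.Chars.isIn [' ', '-', '-', '>', ' '] fA = true := hf
    simp [hf']
  have hlastM : M.getLastD [] = MA.getLastD [] := by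
    obtain ⟨a, ha⟩ : ∃ a, MA.getLast? = some a := by
      cases h : MA.getLast? with
      | none => exact absurd (List.getLast?_eq_none_iff.1 h) hMAne
      | some a => exact ⟨a, rfl⟩
    have hpa : PySem.Chars.isIn " --> ".toList a = true := by
      have : MA.getLastD [] = a := by rw [List.getLastD_eq_getLast?, ha]; rfl
      rwa [this] at hlastIn
    rw [hMfilt, List.getLastD_eq_getLast?, List.getLastD_eq_getLast?,
      filter_getLast?_of MA _ a ha hpa, ha]
  have hMne : M ≠ [] := by
    rw [hMfilt, hFA]
    have hf : PySem.Chars.isIn " --> ".toList fA = true := by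
      rw [hFA] at hheadIn; simpa using hheadIn
    have hf' : PySem.Chars.isIn [' ', '-', '-', '>', ' '] fA = true := hf
    simp [hf']
  -- the two main characterisations, instantiated
  have hsepc : ('\n' ∉ " --> ".toList) := by decide
  have hsepne : (" --> ".toList ≠ []) := by decide
  have hfirst := lineAt_first " --> ".toList hsepc hsepne linesC hneC hfreeC (by rw [← hMdef]; exact hMne)
  have hlast := lineAt_last " --> ".toList hsepc hsepne linesC hneC hfreeC (by rw [← hMdef]; exact hMne)
  rw [hjoinC] at hfirst hlast
  obtain ⟨hi0, hiline⟩ := hfirst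
  obtain ⟨hj0, hjline⟩ := hlast
  rw [← hMdef] at hiline hjline
  -- identify B's strings with A's strings
  have hfind : PySem.Str.find text " --> " = PySem.Chars.find text.toList " --> ".toList :=
    PySem.Str.find_eq _ _
  have hrfind : PySem.Str.rfind text " --> " = PySem.Chars.rfind text.toList " --> ".toList :=
    PySem.Str.rfind_eq _ _
  have hfirstStr : line_at text (PySem.Str.find text " --> ")
      = String.ofList (MA.headD []) := by
    apply String.ext
    rw [line_at_toList, hfind, hiline, hheadM]
    simp
  have hlastStr : line_at text (PySem.Str.rfind text " --> ")
      = String.ofList (MA.getLastD []) := by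
    apply String.ext
    rw [line_at_toList, hrfind, hjline, hlastM]
    simp
  -- evaluate both ports
  unfold extract_min_max_time extract_min_max_time_alt
  have hne1 : ¬ (PySem.Str.find text " --> " = -1) := by rw [hfind]; omega
  simp only [foldA_empty, hheadA, hlastA, if_neg hne1, hfirstStr, hlastStr]
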